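-- pv_equiv track=rewrite | github.com/Jean-LouisH/SourceLicenser | SourceLicenser.py | apply_c_style_inline_comments
-- ===== SOURCE A (Python) =====
-- def apply_c_style_inline_comments(license_content):
--     commented_license_content = "// "
--
--     for i in range(0, len(license_content), 1):
--         commented_license_content += license_content[i]
--         if license_content[i] == "\n":
--             commented_license_content += "// "
--
--     commented_license_content += "\n"
--
--     return commented_license_content
-- ===== SOURCE B (Python) =====
-- def apply_c_style_inline_comments(license_content):
--     return "// " + "\n// ".join(license_content.split("\n")) + "\n"
-- ===== Notes on version B (the rewrite author's own statement) =====
-- stated objective: idiomatic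
-- what changed: Replaces the character-by-character accumulation with newline-triggered re-seeding by splitting the text into lines and joining them once with the comment prefix, i.e. per-line instead of per-character construction.
import Mathlib
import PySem

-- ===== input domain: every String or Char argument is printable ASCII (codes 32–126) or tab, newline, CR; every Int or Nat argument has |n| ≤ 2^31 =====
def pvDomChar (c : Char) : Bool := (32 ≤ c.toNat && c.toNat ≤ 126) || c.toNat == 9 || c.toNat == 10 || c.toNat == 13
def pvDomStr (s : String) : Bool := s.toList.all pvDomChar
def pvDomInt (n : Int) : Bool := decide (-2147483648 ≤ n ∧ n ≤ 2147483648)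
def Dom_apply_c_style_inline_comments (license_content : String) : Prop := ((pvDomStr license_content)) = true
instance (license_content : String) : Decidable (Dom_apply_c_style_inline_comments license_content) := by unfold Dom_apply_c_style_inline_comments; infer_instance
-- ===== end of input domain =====

-- B replaces A's per-character accumulation (with a "// " re-seed after each newline)
-- by split("\n") followed by a single "\n// ".join — per-line construction; objective: idiomatic.

-- ===== PORT A =====
def apply_c_style_inline_comments (license_content : String) : String :=
  let cs := license_content.toList
  let res := (PySem.List.pyRange 0 (PySem.List.len cs) 1).foldl
    (fun acc i =>
      let c := PySem.List.pyGetD cs i ' '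
      let acc := acc ++ [c]
      if c = '\n' then acc ++ ['/', '/', ' '] else acc)
    ['/', '/', ' ']
  String.mk (res ++ ['\n'])

-- ===== PORT B =====
def apply_c_style_inline_comments_alt (license_content : String) : String :=
  let parts := PySem.Chars.splitOn license_content.toList ['\n']
  String.mk (['/', '/', ' '] ++ PySem.Chars.join ['\n', '/', '/', ' '] parts ++ ['\n'])

-- ===== PRECONDITION & SPEC =====
def Spec_apply_c_style_inline_comments (license_content : String) (out : String) : Prop := out = apply_c_style_inline_comments_alt license_content
instance (license_content : String) (out : String) : Decidable (Spec_apply_c_style_inline_comments license_content out) := by unfold Spec_apply_c_style_inline_comments; infer_instance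

-- ===== CLAIM (what is proved, stated in full; the proofs are below) =====
def Claim_equal_apply_c_style_inline_comments : Prop := ∀ (license_content : String), Dom_apply_c_style_inline_comments license_content → Spec_apply_c_style_inline_comments license_content (apply_c_style_inline_comments license_content)

-- ===== LEMMAS AND PROOFS =====

-- the piece contributed per character by A's loop body
def pvPiece (c : Char) : List Char := if c = '\n' then ['\n', '/', '/', ' '] else [c]

-- structural version of splitOn's accumulator recursion, single-char separator '\n'
def pvSplitAux : List Char → List Char → List (List Char)
  | [], cur => [cur.reverse]
  | c :: rest, cur => if c = '\n' then cur.reverse :: pvSplitAux rest [] else pvSplitAux rest (c :: cur)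

theorem pvSplitAux_ne_nil (l cur : List Char) : pvSplitAux l cur ≠ [] := by
  induction l generalizing cur with
  | nil => simp [pvSplitAux]
  | cons c rest ih => simp only [pvSplitAux]; split_ifs <;> simp [ih]

theorem pv_go_eq (fuel : Nat) (l cur : List Char) (acc : List (List Char))
    (h : l.length < fuel) :
    PySem.Chars.splitOn.go ['\n'] fuel l cur acc = acc.reverse ++ pvSplitAux l cur := by
  induction fuel generalizing l cur acc with
  | zero => omega
  | succ fuel ih =>
    cases l with
    | nil => simp [PySem.Chars.splitOn.go, pvSplitAux]
    | cons c rest =>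
      simp only [PySem.Chars.splitOn.go, pvSplitAux]
      by_cases hc : c = '\n'
      · subst hc
        simp only [List.isPrefixOf, beq_self_eq_true, Bool.true_and, if_pos]
        simp only [List.length_cons, List.length_nil, List.drop_succ_cons, List.drop_zero]
        rw [ih rest [] _ (by simpa using Nat.lt_of_succ_lt_succ h)]
        simp
      · have : List.isPrefixOf ['\n'] (c :: rest) = false := by
          simp [List.isPrefixOf]; intro h'; exact hc h'.symm
        rw [this]
        simp only [Bool.false_eq_true, if_false, if_neg hc]
        exact ih rest (c :: cur) acc (by simpa using Nat.lt_of_succ_lt_succ h)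

theorem pv_intercalate_cons (sep a x : List Char) (L : List (List Char)) :
    List.intercalate sep (a :: x :: L) = a ++ sep ++ List.intercalate sep (x :: L) := by
  simp [List.intercalate]

theorem pv_join_splitAux (l cur : List Char) :
    List.intercalate ['\n', '/', '/', ' '] (pvSplitAux l cur)
      = cur.reverse ++ l.flatMap pvPiece := by
  induction l generalizing cur with
  | nil => simp [pvSplitAux, List.intercalate]
  | cons c rest ih =>
    simp only [pvSplitAux, List.flatMap_cons]
    by_cases hc : c = '\n'
    · subst hc
      rw [if_pos rfl]
      obtain ⟨p, ps, hps⟩ := List.exists_cons_of_ne_nil (pvSplitAux_ne_nil rest [])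
      rw [hps, pv_intercalate_cons, ← hps, ih]
      simp [pvPiece]
    · rw [if_neg hc, ih]
      simp [pvPiece, hc]

theorem pv_foldl_pieces (l init : List Char) :
    l.foldl (fun acc c =>
        if c = '\n' then acc ++ [c, '/', '/', ' '] else acc ++ [c]) init
      = init ++ l.flatMap pvPiece := by
  induction l generalizing init with
  | nil => simp
  | cons c rest ih =>
    simp only [List.foldl_cons, List.flatMap_cons, ih]
    by_cases hc : c = '\n' <;> simp [pvPiece, hc]

-- ===== VERDICT (by name: the statement is the Claim_ definition above) =====
theorem apply_c_style_inline_comments_spec : Claim_equal_apply_c_style_inline_comments := by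
  intro s _
  show _ = _
  unfold apply_c_style_inline_comments apply_c_style_inline_comments_alt
  simp only [PySem.Chars.splitOn, PySem.Chars.join]
  rw [pv_go_eq _ _ _ _ (by omega)]
  simp only [List.reverse_nil, List.nil_append]
  rw [pv_join_splitAux]
  rw [PySem.List.foldl_pyRange_pyGetD s.toList ' '
      (fun acc c => let acc := acc ++ [c]; if c = '\n' then acc ++ ['/', '/', ' '] else acc)
      ['/', '/', ' '] (le_refl 0)]
  simp [pv_foldl_pieces]
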